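-- pv_equiv track=rewrite | github.com/CodingOnBush/webserv | www/cgi-bin/cgi_post.py | parse_query_string
-- ===== SOURCE A (Python) =====
-- def parse_query_string(query_string):
--     pairs = query_string.split('&')
--     name = None
--     comment = None
--     for pair in pairs:
--         key, value = pair.split('=')
--         if key == 'name':
--             name = value
--         elif key == 'comment':
--             comment = value
--
--     return name, comment
-- ===== SOURCE B (Python) =====
-- def parse_query_string(query_string):
--     items = [pair.split('=') for pair in query_string.split('&')]
--
--     def last(key):
--         for k, v in reversed(items):
--             if k == key:
--                 return v
--         return None
--
--     return last('name'), last('comment')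
-- ===== Notes on version B (the rewrite author's own statement) =====
-- stated objective: alternative
-- what changed: B first structures the query into a list of split pairs, then answers each of the two fields by an independent back-to-front search with early exit (last-value-wins becomes first-match-in-reverse), instead of A's single forward loop that branches per pair to update two accumulator variables.
import Mathlib
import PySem

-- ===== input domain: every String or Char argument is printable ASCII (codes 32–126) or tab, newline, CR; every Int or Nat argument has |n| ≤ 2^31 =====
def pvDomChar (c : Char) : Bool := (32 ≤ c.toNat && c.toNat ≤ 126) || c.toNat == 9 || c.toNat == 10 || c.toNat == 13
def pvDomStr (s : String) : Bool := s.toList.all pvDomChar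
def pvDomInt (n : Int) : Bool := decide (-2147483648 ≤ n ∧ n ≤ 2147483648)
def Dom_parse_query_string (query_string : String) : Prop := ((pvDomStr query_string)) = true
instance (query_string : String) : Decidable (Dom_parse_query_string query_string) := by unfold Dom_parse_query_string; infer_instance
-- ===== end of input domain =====

-- B structures the query into split pairs once, then answers each field by an independent
-- back-to-front search with early exit, instead of A's forward loop updating two accumulators
-- (objective: alternative; same cost).

-- ===== PORT A =====
def parse_query_string (query_string : String) : Option String × Option String :=
  let pairs := (PySem.Str.split? query_string "&").getD []   -- split? is none only for sep = ""
  pairs.foldl (fun st pair =>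
    match (PySem.Str.split? pair "=").getD [] with
    | [key, value] =>
      if key = "name" then (some value, st.2)
      else if key = "comment" then (st.1, some value)
      else st
    | _ => st)   -- Python raises ValueError here (pair without exactly one '='); excluded by Pre_
    (none, none)

-- ===== PORT B =====
-- B's helper `last`: scan the reversed item list, return the value of the first matching key.
def pqsLast (key : String) : List (List String) → Option String
  | [] => none
  | kv :: rest =>
    -- Python's `for k, v in …` unpacks kv; a kv without exactly 2 parts raises ValueError
    -- there (excluded by Pre_), so the length test guards the unpack exactly.
    if kv.length = 2 then
      if kv.getD 0 "" = key then some (kv.getD 1 "") else pqsLast key rest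
    else none

def parse_query_string_alt (query_string : String) : Option String × Option String :=
  let items := ((PySem.Str.split? query_string "&").getD []).map
    (fun pair => (PySem.Str.split? pair "=").getD [])
  (pqsLast "name" items.reverse, pqsLast "comment" items.reverse)

-- ===== PRECONDITION & SPEC =====
-- Pre_ excludes exactly the inputs where some '&'-separated piece does not contain exactly
-- one '=': there both A and B raise ValueError (tuple unpacking).
def Pre_parse_query_string (query_string : String) : Prop :=
  ∀ p ∈ (PySem.Str.split? query_string "&").getD [], ((PySem.Str.split? p "=").getD []).length = 2
instance (query_string : String) : Decidable (Pre_parse_query_string query_string) := by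
  unfold Pre_parse_query_string; infer_instance
def pvWitness_parse_query_string : String := "name=bob&comment=hi&x=1"
def Spec_parse_query_string (query_string : String) (out : Option String × Option String) : Prop := out = parse_query_string_alt query_string
instance (query_string : String) (out : Option String × Option String) : Decidable (Spec_parse_query_string query_string out) := by unfold Spec_parse_query_string; infer_instance

-- ===== CLAIM (what is proved, stated in full; the proofs are below) =====
def Claim_equal_parse_query_string : Prop := ∀ (query_string : String), Dom_parse_query_string query_string → Pre_parse_query_string query_string → Spec_parse_query_string query_string (parse_query_string query_string)

-- ===== LEMMAS AND PROOFS =====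

-- reverse search distributes over append when the left part is well-formed
theorem pqsLast_append (key : String) (xs ys : List (List String))
    (h : ∀ kv ∈ xs, kv.length = 2) :
    pqsLast key (xs ++ ys) = (pqsLast key xs).orElse (fun _ => pqsLast key ys) := by
  induction xs with
  | nil => simp [pqsLast, Option.orElse]
  | cons kv rest ih =>
    have hkv := h kv (List.mem_cons_self ..)
    obtain ⟨k, v, rfl⟩ : ∃ k v, kv = [k, v] := by
      match kv, hkv with
      | [k, v], _ => exact ⟨k, v, rfl⟩
    simp only [List.cons_append, pqsLast]
    by_cases hk : k = key
    · simp [hk, Option.orElse]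
    · simpa [hk] using ih (fun q hq => h q (List.mem_cons_of_mem _ hq))

-- invariant: A's forward fold from state st equals B's reverse search, falling back to st
theorem pqs_loop_eq (pairs : List String) (st : Option String × Option String)
    (h : ∀ p ∈ pairs, ((PySem.Str.split? p "=").getD []).length = 2) :
    pairs.foldl (fun st pair =>
      match (PySem.Str.split? pair "=").getD [] with
      | [key, value] =>
        if key = "name" then (some value, st.2)
        else if key = "comment" then (st.1, some value)
        else st
      | _ => st) st
    = ((pqsLast "name" ((pairs.map (fun p => (PySem.Str.split? p "=").getD [])).reverse)).orElse (fun _ => st.1),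
       (pqsLast "comment" ((pairs.map (fun p => (PySem.Str.split? p "=").getD [])).reverse)).orElse (fun _ => st.2)) := by
  induction pairs generalizing st with
  | nil => simp [pqsLast, Option.orElse]
  | cons p rest ih =>
    have hp := h p (List.mem_cons_self ..)
    obtain ⟨k, v, hkv⟩ : ∃ k v, (PySem.Str.split? p "=").getD [] = [k, v] := by
      match hl : (PySem.Str.split? p "=").getD [], hp with
      | [k, v], _ => exact ⟨k, v, rfl⟩
    have hrest : ∀ q ∈ rest, ((PySem.Str.split? q "=").getD []).length = 2 :=
      fun q hq => h q (List.mem_cons_of_mem _ hq)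
    have hwf : ∀ kv ∈ (rest.map (fun p => (PySem.Str.split? p "=").getD [])).reverse,
        kv.length = 2 := by
      intro kv hkv'
      simp only [List.mem_reverse, List.mem_map] at hkv'
      obtain ⟨q, hq, rfl⟩ := hkv'
      exact hrest q hq
    simp only [List.foldl_cons, List.map_cons, List.reverse_cons, hkv,
      pqsLast_append _ _ _ hwf, ih _ hrest]
    by_cases hn : k = "name"
    · simp [hn, pqsLast]
    · by_cases hc : k = "comment"
      · simp [hc, pqsLast]
      · simp [hn, hc, pqsLast]

-- ===== VERDICT (by name: the statement is the Claim_ definition above) =====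
theorem parse_query_string_spec : Claim_equal_parse_query_string := by
  intro qs _ hpre
  unfold Spec_parse_query_string parse_query_string parse_query_string_alt
  rw [pqs_loop_eq _ _ hpre]
  simp
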